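-- pv_equiv track=rewrite | github.com/nisbe1218/pf | backend/predictions/views.py | _map_encoded_name_to_raw
-- ===== SOURCE A (Python) =====
-- def _map_encoded_name_to_raw(encoded_name, categorical_features):
--     if encoded_name.startswith('numeric__'):
--         return encoded_name.split('__', 1)[1]
--     if encoded_name.startswith('categorical__'):
--         raw = encoded_name.split('__', 1)[1]
--         for fk in sorted(categorical_features, key=len, reverse=True):
--             if raw.startswith(fk + '_'):
--                 return fk
--         return raw
--     return encoded_name
-- ===== SOURCE B (Python) =====
-- def _map_encoded_name_to_raw(encoded_name, categorical_features):
--     if encoded_name.startswith('numeric__'):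
--         return encoded_name.split('__', 1)[1]
--     if encoded_name.startswith('categorical__'):
--         raw = encoded_name.split('__', 1)[1]
--         best = None
--         for fk in categorical_features:
--             if raw.startswith(fk + '_') and (best is None or len(best) < len(fk)):
--                 best = fk
--         return best if best is not None else raw
--     return encoded_name
-- ===== Notes on version B (the rewrite author's own statement) =====
-- stated objective: simpler
-- what changed: Replaced 'sort categorical_features by length descending, then return the first key whose raw name starts with key+"_"' by a single linear scan that keeps the longest matching key (strict comparison preserves the stable sort's first-on-tie choice); no sort is performed.
import Mathlib
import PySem

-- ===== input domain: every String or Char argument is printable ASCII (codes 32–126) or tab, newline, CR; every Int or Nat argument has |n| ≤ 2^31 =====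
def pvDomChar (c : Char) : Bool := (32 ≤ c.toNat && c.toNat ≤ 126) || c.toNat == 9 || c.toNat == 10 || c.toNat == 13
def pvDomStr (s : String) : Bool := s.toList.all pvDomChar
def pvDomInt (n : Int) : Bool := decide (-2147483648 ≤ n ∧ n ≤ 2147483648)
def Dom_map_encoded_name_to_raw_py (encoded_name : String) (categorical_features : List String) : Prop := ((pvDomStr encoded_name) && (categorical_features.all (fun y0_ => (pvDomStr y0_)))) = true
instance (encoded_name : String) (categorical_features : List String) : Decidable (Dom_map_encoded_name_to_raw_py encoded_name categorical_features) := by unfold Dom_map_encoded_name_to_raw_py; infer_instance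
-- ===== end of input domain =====

-- B replaces A's sort-then-scan with one linear scan keeping the longest matching key (same result; no sort).

-- ===== PORT A =====
-- encoded_name.split('__', 1)[1]; index 1 exists whenever the 'numeric__'/'categorical__' guard held
def pvPart1 (s : String) : String :=
  PySem.List.pyGetD ((PySem.Str.splitMax? s "__" 1).getD []) 1 ""

-- the 'for fk in …: if raw.startswith(fk + "_"): return fk / return raw' loop
def pvLoopA (raw : String) : List String → String
  | [] => raw
  | fk :: rest => if PySem.Str.startswith raw (fk ++ "_") then fk else pvLoopA raw rest

def map_encoded_name_to_raw_py (encoded_name : String) (categorical_features : List String) : String :=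
  if PySem.Str.startswith encoded_name "numeric__" then
    pvPart1 encoded_name
  else if PySem.Str.startswith encoded_name "categorical__" then
    pvLoopA (pvPart1 encoded_name) (PySem.List.sorted categorical_features (fun s => PySem.Str.len s) true)
  else encoded_name

-- ===== PORT B =====
-- one pass: keep the longest key fk with raw.startswith(fk + '_'); strict '<' keeps the earliest on ties
def pvBest (raw : String) (cf : List String) : Option String :=
  cf.foldl (fun best fk =>
    if PySem.Str.startswith raw (fk ++ "_") &&
        (match best with
         | none => true
         | some b => decide (PySem.Str.len b < PySem.Str.len fk))
    then some fk else best) none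

def map_encoded_name_to_raw_py_alt (encoded_name : String) (categorical_features : List String) : String :=
  if PySem.Str.startswith encoded_name "numeric__" then
    pvPart1 encoded_name
  else if PySem.Str.startswith encoded_name "categorical__" then
    match pvBest (pvPart1 encoded_name) categorical_features with
    | some fk => fk
    | none => pvPart1 encoded_name
  else encoded_name

-- ===== PRECONDITION & SPEC =====
def Spec_map_encoded_name_to_raw_py (encoded_name : String) (categorical_features : List String) (out : String) : Prop := out = map_encoded_name_to_raw_py_alt encoded_name categorical_features
instance (encoded_name : String) (categorical_features : List String) (out : String) : Decidable (Spec_map_encoded_name_to_raw_py encoded_name categorical_features out) := by unfold Spec_map_encoded_name_to_raw_py; infer_instance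

-- ===== CLAIM =====
def Claim_equal_map_encoded_name_to_raw_py : Prop := ∀ (encoded_name : String) (categorical_features : List String), Dom_map_encoded_name_to_raw_py encoded_name categorical_features → Spec_map_encoded_name_to_raw_py encoded_name categorical_features (map_encoded_name_to_raw_py encoded_name categorical_features)

-- ===== LEMMAS AND PROOFS =====

-- helpers used only by the proofs
def pvP (raw : String) (fk : String) : Bool := PySem.Str.startswith raw (fk ++ "_")

def pvStep (p : String → Bool) (best : Option String) (fk : String) : Option String :=
  if p fk &&
      (match best with
       | none => true
       | some b => decide (PySem.Str.len b < PySem.Str.len fk))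
  then some fk else best

def pvDesc (l : List String) : Prop :=
  l.Pairwise (fun a b => PySem.Str.len b ≤ PySem.Str.len a)

theorem pvInsertBy_cons (before : String → String → Bool) (x y : String) (ys : List String) :
    PySem.List.insertBy before x (y :: ys)
      = if before x y then x :: y :: ys else y :: PySem.List.insertBy before x ys := rfl

theorem pvLoopA_eq_find (raw : String) (l : List String) :
    pvLoopA raw l = (l.find? (pvP raw)).getD raw := by
  induction l with
  | nil => rfl
  | cons fk rest ih =>
      change (if pvP raw fk = true then fk else pvLoopA raw rest)
          = (List.find? (pvP raw) (fk :: rest)).getD raw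
      cases h : pvP raw fk with
      | true  => simp [h]
      | false => simp [h, ih]

theorem pvFind_insertBy (p : String → Bool) (x : String) (l : List String) (hd : pvDesc l) :
    (PySem.List.insertBy (fun a b => decide (PySem.Str.len b < PySem.Str.len a)) x l).find? p
      = pvStep p (l.find? p) x := by
  induction l with
  | nil => cases h : p x <;> simp [PySem.List.insertBy, pvStep, h]
  | cons y ys ih =>
      have hd' : pvDesc ys := (List.pairwise_cons.mp hd).2
      have hy : ∀ z ∈ ys, PySem.Str.len z ≤ PySem.Str.len y := (List.pairwise_cons.mp hd).1
      rw [pvInsertBy_cons]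
      by_cases hb : PySem.Str.len y < PySem.Str.len x
      · rw [if_pos (by exact decide_eq_true hb)]
        cases hx : p x with
        | true =>
            rcases hfy : List.find? p (y :: ys) with _ | m
            · simp [pvStep, hx]
            · have hm : m ∈ y :: ys := List.mem_of_find?_eq_some hfy
              have hlen : PySem.Str.len m < PySem.Str.len x := by
                rcases List.mem_cons.mp hm with rfl | hm'
                · exact hb
                · exact lt_of_le_of_lt (hy m hm') hb
              have hlen' : m.length < x.length := by simpa using hlen
              simp [pvStep, hx, hlen']
        | false =>
            simp [pvStep, hx]
      · rw [if_neg (by simpa using hb)]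
        cases hyp : p y with
        | true  =>
            have hb' : ¬ y.length < x.length := by simpa using hb
            simp [pvStep, hyp, hb']
        | false =>
            simp only [List.find?_cons, hyp]
            exact ih hd'

theorem pvDesc_insertBy (x : String) (l : List String) (hd : pvDesc l) :
    pvDesc (PySem.List.insertBy (fun a b => decide (PySem.Str.len b < PySem.Str.len a)) x l) := by
  induction l with
  | nil => simp [PySem.List.insertBy, pvDesc]
  | cons y ys ih =>
      have hd' : pvDesc ys := (List.pairwise_cons.mp hd).2
      have hy : ∀ z ∈ ys, PySem.Str.len z ≤ PySem.Str.len y := (List.pairwise_cons.mp hd).1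
      rw [pvInsertBy_cons]
      by_cases hb : PySem.Str.len y < PySem.Str.len x
      · rw [if_pos (by exact decide_eq_true hb)]
        refine List.pairwise_cons.mpr ⟨?_, hd⟩
        intro z hz
        rcases List.mem_cons.mp hz with rfl | hz'
        · exact le_of_lt hb
        · exact le_trans (hy z hz') (le_of_lt hb)
      · rw [if_neg (by simpa using hb)]
        refine List.pairwise_cons.mpr ⟨?_, ih hd'⟩
        intro z hz
        rw [PySem.List.mem_insertBy] at hz
        rcases hz with rfl | hz'
        · exact not_lt.mp hb
        · exact hy z hz'

theorem pvFind_foldl (p : String → Bool) (cf : List String) (l : List String) (hd : pvDesc l) :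
    (cf.foldl (fun acc x =>
        PySem.List.insertBy (fun a b => decide (PySem.Str.len b < PySem.Str.len a)) x acc) l).find? p
      = cf.foldl (pvStep p) (l.find? p) := by
  induction cf generalizing l with
  | nil => rfl
  | cons x cf ih =>
      simp only [List.foldl_cons]
      rw [ih _ (pvDesc_insertBy x l hd), pvFind_insertBy p x l hd]

theorem pvBest_eq (raw : String) (cf : List String) :
    (PySem.List.sorted cf (fun s => PySem.Str.len s) true).find? (pvP raw) = pvBest raw cf := by
  rw [PySem.List.sorted_rev_eq_foldl_insertBy]
  exact pvFind_foldl (pvP raw) cf [] List.Pairwise.nil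

-- ===== VERDICT =====
theorem map_encoded_name_to_raw_py_spec : Claim_equal_map_encoded_name_to_raw_py := by
  intro encoded_name cf _
  unfold Spec_map_encoded_name_to_raw_py map_encoded_name_to_raw_py map_encoded_name_to_raw_py_alt
  by_cases h1 : PySem.Str.startswith encoded_name "numeric__" = true
  · rw [if_pos h1, if_pos h1]
  · rw [if_neg h1, if_neg h1]
    by_cases h2 : PySem.Str.startswith encoded_name "categorical__" = true
    · rw [if_pos h2, if_pos h2]
      rw [pvLoopA_eq_find, pvBest_eq]
      cases hb : pvBest (pvPart1 encoded_name) cf with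
      | none => simp
      | some fk => simp
    · rw [if_neg h2, if_neg h2]
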